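-- pv_equiv track=rewrite | github.com/Jsim6342/python-algorithm | 프로그래머스-스터디/큐,힙/기능개발.py | solution
-- ===== SOURCE A (Python) =====
-- import math
--
-- def solution(progresses, speeds):
--     result = []
--     dates = []
--
--     for progress, speed in zip(progresses, speeds):
--         dates.append(math.ceil((100 - progress) / speed))
--
--     maxNum = dates[0]
--     count = 0
--     for date in dates:
--         if date > maxNum:
--             maxNum = date
--             result.append(count)
--             count = 1
--         else:
--             count += 1
--     result.append(count)
--
--     return result
-- ===== SOURCE B (Python) =====
-- def solution(progresses, speeds):
--     # Stage 1: exact finish day per task (integer ceiling division; equals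
--     # math.ceil((100 - p) / s) for the magnitudes involved here).
--     days = [-((p - 100) // s) for p, s in zip(progresses, speeds)]
--     # Stage 2: release day of each task = latest finish day among it and its
--     # predecessors (prefix maxima).
--     peaks = days[:1]
--     for d in days[1:]:
--         peaks.append(max(peaks[-1], d))
--     # Stage 3: histogram of release days; insertion order of the dict is the
--     # chronological order of the (non-decreasing) release days.
--     counts = {}
--     for r in peaks:
--         counts[r] = counts.get(r, 0) + 1
--     return list(counts.values())
-- ===== Notes on version B (the rewrite author's own statement) =====
-- stated objective: alternative
-- what changed: Replaces A's fused loop (running maximum with a count that is appended and reset at each new maximum) by three staged passes: compute finish days with integer ceiling division, compute each task's release day as the prefix maximum, then histogram the release days in an insertion-ordered dict whose values list is the answer.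
import Mathlib
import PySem

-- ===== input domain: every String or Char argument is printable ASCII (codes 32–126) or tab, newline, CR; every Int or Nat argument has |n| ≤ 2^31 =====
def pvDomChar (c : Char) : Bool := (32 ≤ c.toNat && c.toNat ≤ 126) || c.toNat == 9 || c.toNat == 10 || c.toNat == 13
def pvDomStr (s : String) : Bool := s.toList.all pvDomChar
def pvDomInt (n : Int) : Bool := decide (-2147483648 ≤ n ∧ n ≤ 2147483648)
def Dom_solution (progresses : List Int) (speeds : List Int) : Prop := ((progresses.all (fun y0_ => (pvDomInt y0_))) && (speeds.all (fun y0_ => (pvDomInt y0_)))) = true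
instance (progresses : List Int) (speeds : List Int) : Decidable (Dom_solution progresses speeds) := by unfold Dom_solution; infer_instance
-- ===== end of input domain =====

-- B replaces A's fused running-max/count/reset loop by three staged passes — finish
-- days, prefix maxima (release days), then a dict histogram of release days whose
-- values are the answer; objective: alternative decomposition, same O(n) cost.

-- ===== PORT A =====
-- math.ceil((100 - progress) / speed) as exact integer ceiling division: exact on Dom
-- because |100 - p| ≤ 2^31 + 100 and 1 ≤ |s| ≤ 2^31 keep the float quotient within
-- 2^-22·(1/|s|) of the exact value, closer than any gap to the nearest integer.
def pyCeil (a b : Int) : Int := -(PySem.Int.floordiv (-a) b)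

-- one step of A's "for date in dates" loop, state (result, maxNum, count)
def stepA (s : List Int × Int × Int) (d : Int) : List Int × Int × Int :=
  if d > s.2.1 then (s.1 ++ [s.2.2], d, 1) else (s.1, s.2.1, s.2.2 + 1)

def solution (progresses : List Int) (speeds : List Int) : List Int :=
  let dates := (progresses.zip speeds).map (fun pr => pyCeil (100 - pr.1) pr.2)
  -- dates[0] raises IndexError on empty dates: excluded by Pre_solution, so the
  -- headD default is never read on admitted inputs
  let s := dates.foldl stepA ([], dates.headD 0, 0)
  s.1 ++ [s.2.2]

-- ===== PORT B =====
-- -((p - 100) // s)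
def ceilDivB (p s : Int) : Int := -(PySem.Int.floordiv (p - 100) s)

-- peaks.append(max(peaks[-1], d)); peaks is nonempty whenever this body runs
-- (it starts as days[:1] and the loop runs only if days[1:] ≠ []), so
-- peaks[-1] = pyGet? peaks (-1) is always `some`; the .getD 0 default is unreachable.
def stepPeak (ps : List Int) (d : Int) : List Int :=
  ps ++ [max ((PySem.List.pyGet? ps (-1)).getD 0) d]

-- counts[r] = counts.get(r, 0) + 1
def stepCount (dct : PySem.Dict Int Int) (r : Int) : PySem.Dict Int Int :=
  dct.insert r (dct.getD r 0 + 1)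

def solution_alt (progresses : List Int) (speeds : List Int) : List Int :=
  let days := (progresses.zip speeds).map (fun pr => ceilDivB pr.1 pr.2)
  let peaks := (days.drop 1).foldl stepPeak (days.take 1)
  (peaks.foldl stepCount PySem.Dict.empty).values

-- ===== PRECONDITION & SPEC =====
-- Pre_ excludes exactly the inputs where Python A raises: an empty progresses or
-- speeds (IndexError on dates[0]) and a zero speed among the zipped pairs
-- (ZeroDivisionError).
def Pre_solution (progresses : List Int) (speeds : List Int) : Prop :=
  progresses ≠ [] ∧ speeds ≠ [] ∧ ∀ pr ∈ progresses.zip speeds, pr.2 ≠ 0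
instance (progresses : List Int) (speeds : List Int) : Decidable (Pre_solution progresses speeds) := by unfold Pre_solution; infer_instance

def pvWitness_solution : List Int × List Int := ([93, 30, 55], [1, 30, 5])

def Spec_solution (progresses : List Int) (speeds : List Int) (out : List Int) : Prop := out = solution_alt progresses speeds
instance (progresses : List Int) (speeds : List Int) (out : List Int) : Decidable (Spec_solution progresses speeds out) := by unfold Spec_solution; infer_instance

-- ===== CLAIM (what is proved, stated in full; the proofs are below) =====
def Claim_equal_solution : Prop := ∀ (progresses : List Int) (speeds : List Int), Dom_solution progresses speeds → Pre_solution progresses speeds → Spec_solution progresses speeds (solution progresses speeds)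

-- ===== LEMMAS AND PROOFS =====

-- the prefix maxima of a list continued from a running maximum m
def peaksFrom (m : Int) : List Int → List Int
  | [] => []
  | d :: ds => max m d :: peaksFrom (max m d) ds

lemma peaks_fold (ds : List Int) : ∀ (acc : List Int) (m : Int), acc.getLast? = some m →
    ds.foldl stepPeak acc = acc ++ peaksFrom m ds := by
  induction ds with
  | nil => intro acc m _; simp [peaksFrom]
  | cons d ds ih =>
    intro acc m hlast
    obtain ⟨l, rfl⟩ : ∃ l, acc = l ++ [m] := by
      rcases List.eq_nil_or_concat acc with h | ⟨l, x, rfl⟩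
      · simp [h] at hlast
      · simp at hlast; exact ⟨l, by simp [hlast]⟩
    have hstep : stepPeak (l ++ [m]) d = (l ++ [m]) ++ [max m d] := by
      simp [stepPeak, PySem.List.pyGet?, PySem.List.pyIdx?]
    rw [List.foldl_cons, hstep, ih _ (max m d) (by simp)]
    simp [peaksFrom]

lemma main_lemma (ds : List Int) : ∀ (I : List (Int × Int)) (m c : Int),
    List.Pairwise (· < ·) (I.map Prod.fst ++ [m]) →
    ((peaksFrom m ds).foldl stepCount (PySem.Dict.mk (I ++ [(m, c)]))).values
      = (ds.foldl stepA (I.map Prod.snd, m, c)).1 ++ [(ds.foldl stepA (I.map Prod.snd, m, c)).2.2] := by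
  induction ds with
  | nil =>
    intro I m c _
    simp [peaksFrom, PySem.Dict.values]
  | cons d ds ih =>
    intro I m c hpw
    have hkeys_lt : ∀ p ∈ I, p.1 < m := by
      intro p hp
      exact (List.pairwise_append.mp hpw).2.2 p.1 (List.mem_map_of_mem hp) m (by simp)
    have hnd : ((PySem.Dict.mk (I ++ [(m, c)])).keys).Nodup := by
      have : (I.map Prod.fst ++ [m]).Nodup := hpw.imp ne_of_lt
      simpa [PySem.Dict.keys] using this
    by_cases hgt : m < d
    · -- new maximum: fresh key d appended to the dict, A appends count and resets
      have hmax : max m d = d := max_eq_right hgt.le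
      have hnc : (PySem.Dict.mk (I ++ [(m, c)])).contains d = false := by
        rw [PySem.Dict.contains_mk]
        simp only [List.any_eq_false, beq_iff_eq]
        intro p hp
        rcases List.mem_append.mp hp with h | h
        · exact ne_of_lt (lt_trans (hkeys_lt p h) hgt)
        · have : p = (m, c) := by simpa using h
          rw [this]; exact ne_of_lt hgt
      have hstep : stepCount (PySem.Dict.mk (I ++ [(m, c)])) d
          = PySem.Dict.mk ((I ++ [(m, c)]) ++ [(d, 1)]) := by
        apply PySem.Dict.ext
        rw [stepCount, PySem.Dict.getD_of_not_contains _ _ hnc,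
          PySem.Dict.items_insert_of_not_contains _ _ hnc]
        simp
      have hall : ∀ a ∈ I.map Prod.fst ++ [m], a < d := by
        intro a ha
        rcases List.mem_append.mp ha with h | h
        · obtain ⟨p, hp, rfl⟩ := List.mem_map.mp h
          exact lt_trans (hkeys_lt p hp) hgt
        · have : a = m := by simpa using h
          rw [this]; exact hgt
      have hpw' : List.Pairwise (· < ·) ((I ++ [(m, c)]).map Prod.fst ++ [d]) := by
        have : (I ++ [(m, c)]).map Prod.fst = I.map Prod.fst ++ [m] := by simp
        rw [this]
        exact List.pairwise_append.mpr
          ⟨hpw, List.pairwise_singleton _ _, fun a ha b hb => by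
            have : b = d := by simpa using hb
            rw [this]; exact hall a ha⟩
      have hih := ih (I ++ [(m, c)]) d 1 hpw'
      simp only [peaksFrom, List.foldl_cons, hmax, hstep]
      rw [hih]
      simp [stepA, hgt]
    · -- d ≤ m: the running maximum's entry (last in the dict) is incremented in place
      have hmax : max m d = m := max_eq_left (not_lt.mp hgt)
      have hgetD : (PySem.Dict.mk (I ++ [(m, c)])).getD m 0 = c :=
        PySem.Dict.getD_of_mem_items _ (by simp) hnd 0
      have hstep : stepCount (PySem.Dict.mk (I ++ [(m, c)])) m
          = PySem.Dict.mk (I ++ [(m, c + 1)]) := by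
        apply PySem.Dict.ext
        have hc : (PySem.Dict.mk (I ++ [(m, c)])).contains m = true := by
          rw [PySem.Dict.contains_mk]; simp
        rw [stepCount, hgetD, PySem.Dict.items_insert_of_contains _ _ hc]
        show (I ++ [(m, c)]).map (fun p => if p.1 == m then (m, c + 1) else p) = _
        rw [List.map_append]
        congr 1
        · calc I.map (fun p => if p.1 == m then (m, c + 1) else p)
              = I.map id := List.map_congr_left (fun p hp => by
                simp [beq_false_of_ne (ne_of_lt (hkeys_lt p hp))])
            _ = I := List.map_id I
        · simp
      have hih := ih I m (c + 1) hpw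
      simp only [peaksFrom, List.foldl_cons, hmax, hstep]
      rw [hih]
      simp [stepA, hgt]

-- the two ports compute the same finish-day list
lemma days_eq (progresses speeds : List Int) :
    (progresses.zip speeds).map (fun pr => pyCeil (100 - pr.1) pr.2)
      = (progresses.zip speeds).map (fun pr => ceilDivB pr.1 pr.2) := by
  apply List.map_congr_left
  intro pr _
  simp [pyCeil, ceilDivB, neg_sub]

-- ===== VERDICT (by name: the statement is the Claim_ definition above) =====
theorem solution_spec : Claim_equal_solution := by
  intro progresses speeds _ hpre
  obtain ⟨hp, hs, -⟩ := hpre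
  rcases progresses with _ | ⟨p, ps⟩
  · exact absurd rfl hp
  rcases speeds with _ | ⟨s, ss⟩
  · exact absurd rfl hs
  unfold Spec_solution
  simp only [solution, solution_alt]
  rw [days_eq (p :: ps) (s :: ss)]
  simp only [List.zip_cons_cons, List.map_cons]
  set d0 := ceilDivB p s with hd0
  set ds := (ps.zip ss).map (fun pr => ceilDivB pr.1 pr.2) with hds
  have hfirst : stepCount PySem.Dict.empty d0 = PySem.Dict.mk ([] ++ [(d0, 1)]) := by
    apply PySem.Dict.ext
    rw [stepCount, PySem.Dict.getD_of_not_contains _ _ (PySem.Dict.contains_empty d0),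
      PySem.Dict.items_insert_of_not_contains _ _ (PySem.Dict.contains_empty d0)]
    rfl
  rw [show (d0 :: ds).headD 0 = d0 from rfl, List.foldl_cons,
    show stepA ([], d0, 0) d0 = ([], d0, 1) by simp [stepA],
    show List.take 1 (d0 :: ds) = [d0] from rfl,
    show List.drop 1 (d0 :: ds) = ds from rfl,
    peaks_fold ds [d0] d0 (by simp), List.foldl_append, List.foldl_cons, List.foldl_nil,
    hfirst]
  have hml := main_lemma ds [] d0 1 (by simp)
  simpa using hml.symm
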